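-- pv_equiv track=rewrite | github.com/Mark-Hopkins-at-Williams/testperanto | testperanto/analysis.py | type_count_over_time
-- ===== SOURCE A (Python) =====
-- def type_count_over_time(token_stream, x_values):
--     """ Tracks the number of types in a token stream. """
--     token_set = set()
--     token_counter = 0
--     x_vals = []
--     singleton_cts = []
--     for token in token_stream:
--         token_counter += 1
--         token_set.add(token)
--         if token_counter in x_values:
--             x_vals.append(token_counter)
--             singleton_cts.append(len(token_set))
--     return x_vals, singleton_cts
-- ===== SOURCE B (Python) =====
-- def type_count_over_time(token_stream, x_values):
--     """ Tracks the number of types in a token stream. """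
--     # One pass: record the 1-based positions of first occurrences, then answer
--     # the sorted distinct sample positions with a two-pointer merge over firsts.
--     seen = set()
--     firsts = []
--     pos = 0
--     for token in token_stream:
--         pos += 1
--         if token not in seen:
--             seen.add(token)
--             firsts.append(pos)
--     x_vals = []
--     singleton_cts = []
--     i = 0  # number of first-occurrence positions <= current sample position
--     for p in sorted(set(x_values)):
--         if 1 <= p <= pos:
--             while i < len(firsts) and firsts[i] <= p:
--                 i += 1
--             x_vals.append(p)
--             singleton_cts.append(i)
--     return x_vals, singleton_cts
-- ===== Notes on version B (the rewrite author's own statement) =====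
-- stated objective: alternative
-- what changed: Instead of scanning x_values for each stream position while maintaining a running membership set, B makes one pass recording first-occurrence positions and then answers the sorted distinct sample positions by a two-pointer merge over those positions.
import Mathlib
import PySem

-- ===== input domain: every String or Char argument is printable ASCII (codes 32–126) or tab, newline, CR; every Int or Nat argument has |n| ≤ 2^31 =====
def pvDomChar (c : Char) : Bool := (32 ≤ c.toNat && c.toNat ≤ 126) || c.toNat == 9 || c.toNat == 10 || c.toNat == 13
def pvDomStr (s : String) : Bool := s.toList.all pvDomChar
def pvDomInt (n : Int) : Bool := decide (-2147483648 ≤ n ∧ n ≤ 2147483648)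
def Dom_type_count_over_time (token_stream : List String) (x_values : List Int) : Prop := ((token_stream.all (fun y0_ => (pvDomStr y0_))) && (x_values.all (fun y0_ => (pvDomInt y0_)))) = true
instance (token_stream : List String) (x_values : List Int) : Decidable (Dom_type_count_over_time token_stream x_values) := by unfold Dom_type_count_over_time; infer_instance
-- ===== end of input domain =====

-- B replaces A's per-token 'position in x_values' list scan by one pass recording first-occurrence
-- positions followed by a two-pointer merge against the sorted distinct sample positions (alternative
-- decomposition; equivalence of the return values is proved below).

-- ===== PORT A =====
-- the body of A's 'for token in token_stream' loop, on state (token_set, token_counter, x_vals, singleton_cts)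
def stepA (x_values : List Int) (st : PySem.Set String × Int × List Int × List Int) (token : String) :
    PySem.Set String × Int × List Int × List Int :=
  let c := st.2.1 + 1
  let s := PySem.Set.add st.1 token
  if x_values.contains c then (s, c, st.2.2.1 ++ [c], st.2.2.2 ++ [PySem.Set.len s])
  else (s, c, st.2.2.1, st.2.2.2)

def type_count_over_time (token_stream : List String) (x_values : List Int) : List Int × List Int :=
  ((token_stream.foldl (stepA x_values)
      ((PySem.Set.empty : PySem.Set String), (0 : Int), ([] : List Int), ([] : List Int))).2.2.1,
   (token_stream.foldl (stepA x_values)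
      ((PySem.Set.empty : PySem.Set String), (0 : Int), ([] : List Int), ([] : List Int))).2.2.2)

-- ===== PORT B =====
-- the body of B's first loop, on state (seen, firsts, pos)
def stepB1 (st : PySem.Set String × List Int × Int) (token : String) : PySem.Set String × List Int × Int :=
  let pos := st.2.2 + 1
  if PySem.Set.contains st.1 token then (st.1, st.2.1, pos)
  else (PySem.Set.add st.1 token, st.2.1 ++ [pos], pos)

-- B's inner 'while i < len(firsts) and firsts[i] <= p: i += 1', as (counter, remaining suffix of firsts)
def pyAdvance (rest : List Int) (cnt : Int) (p : Int) : Int × List Int :=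
  match rest with
  | [] => (cnt, [])
  | q :: qs => if q ≤ p then pyAdvance qs (cnt + 1) p else (cnt, q :: qs)

-- the body of B's second loop, on state (i as (counter, suffix of firsts), x_vals, singleton_cts)
def stepB2 (n : Int) (st : Int × List Int × List Int × List Int) (p : Int) :
    Int × List Int × List Int × List Int :=
  if 1 ≤ p ∧ p ≤ n then
    let ar := pyAdvance st.2.1 st.1 p
    (ar.1, ar.2, st.2.2.1 ++ [p], st.2.2.2 ++ [ar.1])
  else st

def type_count_over_time_alt (token_stream : List String) (x_values : List Int) : List Int × List Int :=
  (((PySem.List.sorted (PySem.Set.ofList x_values) (fun x => x) false).foldl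
      (stepB2 (token_stream.foldl stepB1
        ((PySem.Set.empty : PySem.Set String), ([] : List Int), (0 : Int))).2.2)
      ((0 : Int),
       (token_stream.foldl stepB1
        ((PySem.Set.empty : PySem.Set String), ([] : List Int), (0 : Int))).2.1,
       ([] : List Int), ([] : List Int))).2.2.1,
   ((PySem.List.sorted (PySem.Set.ofList x_values) (fun x => x) false).foldl
      (stepB2 (token_stream.foldl stepB1
        ((PySem.Set.empty : PySem.Set String), ([] : List Int), (0 : Int))).2.2)
      ((0 : Int),
       (token_stream.foldl stepB1
        ((PySem.Set.empty : PySem.Set String), ([] : List Int), (0 : Int))).2.1,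
       ([] : List Int), ([] : List Int))).2.2.2)

-- ===== PRECONDITION & SPEC =====
def Spec_type_count_over_time (token_stream : List String) (x_values : List Int) (out : List Int × List Int) : Prop := out = type_count_over_time_alt token_stream x_values
instance (token_stream : List String) (x_values : List Int) (out : List Int × List Int) : Decidable (Spec_type_count_over_time token_stream x_values out) := by unfold Spec_type_count_over_time; infer_instance

-- ===== CLAIM (what is proved, stated in full; the proofs are below) =====
def Claim_equal_type_count_over_time : Prop := ∀ (token_stream : List String) (x_values : List Int), Dom_type_count_over_time token_stream x_values → Spec_type_count_over_time token_stream x_values (type_count_over_time token_stream x_values)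

-- ===== LEMMAS AND PROOFS =====

-- A's loop, as (position, running set size) pairs for the selected positions
def mkPairs (xs : List Int) : List String → PySem.Set String → Int → List (Int × Int)
  | [], _, _ => []
  | t :: ts, s, c =>
      (if xs.contains (c + 1) then [(c + 1, PySem.Set.len (PySem.Set.add s t))] else [])
        ++ mkPairs xs ts (PySem.Set.add s t) (c + 1)

-- B's first loop, as the list of first-occurrence positions
def firstsF : List String → PySem.Set String → Int → List Int
  | [], _, _ => []
  | t :: ts, s, c =>
      if PySem.Set.contains s t then firstsF ts s (c + 1)
      else (c + 1) :: firstsF ts (PySem.Set.add s t) (c + 1)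

-- the positions c+1 .. c+n that occur in xs, in ascending order
def selPos (xs : List Int) : Nat → Int → List Int
  | 0, _ => []
  | n + 1, c => (if (c + 1) ∈ xs then [c + 1] else []) ++ selPos xs n (c + 1)

lemma loopA_eq (xs : List Int) (ts : List String) :
    ∀ (s : PySem.Set String) (c : Int) (xv sc : List Int),
    (ts.foldl (stepA xs) (s, c, xv, sc)).2.2 =
      (xv ++ (mkPairs xs ts s c).map Prod.fst, sc ++ (mkPairs xs ts s c).map Prod.snd) := by
  induction ts with
  | nil => intro s c xv sc; simp [mkPairs]
  | cons t ts ih =>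
    intro s c xv sc
    by_cases h : (c + 1) ∈ xs
    · simp [List.foldl_cons, stepA, h, ih, mkPairs]
    · simp [List.foldl_cons, stepA, h, ih, mkPairs]

lemma loopB1_eq (ts : List String) :
    ∀ (s : PySem.Set String) (fl : List Int) (c : Int),
    (ts.foldl stepB1 (s, fl, c)).2 = (fl ++ firstsF ts s c, c + (ts.length : Int)) := by
  induction ts with
  | nil => intro s fl c; simp [firstsF]
  | cons t ts ih =>
    intro s fl c
    have hc : c + ((ts.length + 1 : Nat) : Int) = (c + 1) + (ts.length : Int) := by push_cast; ring
    by_cases h : t ∈ s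
    · simp [List.foldl_cons, stepB1, h, ih, firstsF]
      omega
    · simp [List.foldl_cons, stepB1, h, ih, firstsF]
      omega

lemma firstsF_gt (ts : List String) :
    ∀ (s : PySem.Set String) (c : Int) (q : Int), q ∈ firstsF ts s c → c < q := by
  induction ts with
  | nil => intro s c q hq; simp [firstsF] at hq
  | cons t ts ih =>
    intro s c q hq
    by_cases h : t ∈ s
    · simp only [firstsF, PySem.Set.contains_eq_listContains] at hq
      rw [if_pos (by simpa using h)] at hq
      have := ih s (c + 1) q hq
      omega
    · simp only [firstsF, PySem.Set.contains_eq_listContains] at hq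
      rw [if_neg (by simpa using h)] at hq
      rcases List.mem_cons.mp hq with hq | hq
      · omega
      · have := ih (PySem.Set.add s t) (c + 1) q hq
        omega

lemma firstsF_pairwise (ts : List String) :
    ∀ (s : PySem.Set String) (c : Int), (firstsF ts s c).Pairwise (· ≤ ·) := by
  induction ts with
  | nil => intro s c; simp [firstsF]
  | cons t ts ih =>
    intro s c
    by_cases h : t ∈ s
    · simp only [firstsF, PySem.Set.contains_eq_listContains]
      rw [if_pos (by simpa using h)]
      exact ih s (c + 1)
    · simp only [firstsF, PySem.Set.contains_eq_listContains]
      rw [if_neg (by simpa using h)]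
      refine List.pairwise_cons.mpr ⟨?_, ih (PySem.Set.add s t) (c + 1)⟩
      intro q hq
      have := firstsF_gt ts (PySem.Set.add s t) (c + 1) q hq
      omega

lemma selPos_gt (xs : List Int) : ∀ (n : Nat) (c : Int) (q : Int), q ∈ selPos xs n c → c < q := by
  intro n
  induction n with
  | zero => intro c q hq; simp [selPos] at hq
  | succ n ih =>
    intro c q hq
    simp only [selPos, List.mem_append] at hq
    rcases hq with hq | hq
    · by_cases h : (c + 1) ∈ xs
      · rw [if_pos h] at hq; simp only [List.mem_singleton] at hq; omega
      · rw [if_neg h] at hq; simp at hq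
    · have := ih (c + 1) q hq
      omega

lemma selPos_mem (xs : List Int) : ∀ (n : Nat) (c : Int) (q : Int),
    q ∈ selPos xs n c ↔ q ∈ xs ∧ c + 1 ≤ q ∧ q ≤ c + (n : Int) := by
  intro n
  induction n with
  | zero =>
    intro c q
    constructor
    · intro h; simp [selPos] at h
    · rintro ⟨_, h2, h3⟩
      exfalso
      simp only [Nat.cast_zero, add_zero] at h3
      omega
  | succ n ih =>
    intro c q
    simp only [selPos, List.mem_append]
    rw [ih (c + 1)]
    by_cases h : (c + 1) ∈ xs
    · rw [if_pos h]
      simp only [List.mem_singleton]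
      constructor
      · rintro (rfl | ⟨h1, h2, h3⟩)
        · refine ⟨h, by omega, by push_cast; omega⟩
        · refine ⟨h1, by omega, by push_cast; push_cast at h3; omega⟩
      · rintro ⟨h1, h2, h3⟩
        by_cases hq : q = c + 1
        · exact Or.inl hq
        · exact Or.inr ⟨h1, by omega, by push_cast; push_cast at h3; omega⟩
    · rw [if_neg h]
      simp only [List.not_mem_nil, false_or]
      constructor
      · rintro ⟨h1, h2, h3⟩
        refine ⟨h1, by omega, by push_cast; push_cast at h3; omega⟩
      · rintro ⟨h1, h2, h3⟩
        have hq : q ≠ c + 1 := by rintro rfl; exact h h1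
        refine ⟨h1, by omega, by push_cast; push_cast at h3; omega⟩

lemma selPos_pairwise (xs : List Int) : ∀ (n : Nat) (c : Int), (selPos xs n c).Pairwise (· < ·) := by
  intro n
  induction n with
  | zero => intro c; simp [selPos]
  | succ n ih =>
    intro c
    by_cases h : (c + 1) ∈ xs
    · simp only [selPos, if_pos h, List.singleton_append]
      refine List.pairwise_cons.mpr ⟨?_, ih (c + 1)⟩
      intro q hq
      exact selPos_gt xs n (c + 1) q hq
    · simp only [selPos, if_neg h, List.nil_append]
      exact ih (c + 1)

-- A's pairs, characterised: positions are selPos, the running set size at p counts the firsts ≤ p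
lemma mkPairs_eq (xs : List Int) (ts : List String) :
    ∀ (s : PySem.Set String) (c : Int),
    mkPairs xs ts s c = (selPos xs ts.length c).map
      (fun p => (p, (((firstsF ts s c).countP (fun q => decide (q ≤ p)) : Nat) : Int)
        + PySem.Set.len s)) := by
  induction ts with
  | nil => intro s c; simp [mkPairs, selPos]
  | cons t ts ih =>
    intro s c
    have hgt : ∀ q ∈ firstsF ts (PySem.Set.add s t) (c + 1), c + 1 < q :=
      fun q hq => firstsF_gt ts (PySem.Set.add s t) (c + 1) q hq
    by_cases hm : t ∈ s
    · have hadd : PySem.Set.add s t = s := PySem.Set.add_of_mem hm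
      have hF : firstsF (t :: ts) s c = firstsF ts s (c + 1) := by
        simp only [firstsF, PySem.Set.contains_eq_listContains]
        rw [if_pos (by simpa using hm)]
      have hgt' : ∀ q ∈ firstsF ts s (c + 1), c + 1 < q :=
        fun q hq => firstsF_gt ts s (c + 1) q hq
      simp only [mkPairs, hadd, hF, List.length_cons, selPos]
      rw [ih s (c + 1)]
      by_cases h : (c + 1) ∈ xs
      · rw [if_pos (by simpa using h), if_pos h]
        simp only [List.singleton_append, List.map_cons]
        congr 1
        · -- head: count of firsts ≤ c+1 is 0 here
          have hz : (firstsF ts s (c + 1)).countP (fun q => decide (q ≤ c + 1)) = 0 :=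
            List.countP_eq_zero.mpr (fun q hq => by
              have := hgt' q hq
              simp only [decide_eq_true_eq]; omega)
          simp [hz]
      · rw [if_neg (by simpa using h), if_neg h]
        simp
    · have hadd : PySem.Set.add s t = s ++ [t] := PySem.Set.add_of_not_mem hm
      have hlen : PySem.Set.len (PySem.Set.add s t) = PySem.Set.len s + 1 := by
        simp [hadd, PySem.Set.len]
      have hF : firstsF (t :: ts) s c = (c + 1) :: firstsF ts (PySem.Set.add s t) (c + 1) := by
        simp only [firstsF, PySem.Set.contains_eq_listContains]
        rw [if_neg (by simpa using hm)]
      simp only [mkPairs, hF, List.length_cons, selPos]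
      rw [ih (PySem.Set.add s t) (c + 1)]
      have hmapeq : ∀ p ∈ selPos xs ts.length (c + 1),
          ((p, (((firstsF ts (PySem.Set.add s t) (c + 1)).countP
              (fun q => decide (q ≤ p)) : Nat) : Int) + PySem.Set.len (PySem.Set.add s t)) : Int × Int)
          = (p, ((((c + 1) :: firstsF ts (PySem.Set.add s t) (c + 1)).countP
              (fun q => decide (q ≤ p)) : Nat) : Int) + PySem.Set.len s) := by
        intro p hp
        have hp1 : c + 1 < p := selPos_gt xs ts.length (c + 1) p hp
        have hd : (decide ((c + 1 : Int) ≤ p)) = true := by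
          simp only [decide_eq_true_eq]; omega
        rw [List.countP_cons, hd, hlen]
        simp only [Prod.mk.injEq, true_and]
        push_cast
        ring
      by_cases h : (c + 1) ∈ xs
      · rw [if_pos (by simpa using h), if_pos h]
        simp only [List.singleton_append, List.map_cons]
        congr 1
        · -- head pair
          have hz : (firstsF ts (PySem.Set.add s t) (c + 1)).countP
              (fun q => decide (q ≤ c + 1)) = 0 :=
            List.countP_eq_zero.mpr (fun q hq => by
              have := hgt q hq
              simp only [decide_eq_true_eq]; omega)
          rw [List.countP_cons, hz, hlen]
          simp
          try omega
        · exact List.map_congr_left hmapeq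
      · rw [if_neg (by simpa using h), if_neg h]
        simp only [List.nil_append]
        exact List.map_congr_left hmapeq

lemma pyAdvance_eq (p : Int) : ∀ (rest : List Int) (cnt : Int),
    pyAdvance rest cnt p =
      (cnt + ((rest.takeWhile (fun q => decide (q ≤ p))).length : Int),
       rest.dropWhile (fun q => decide (q ≤ p))) := by
  intro rest
  induction rest with
  | nil => intro cnt; simp [pyAdvance]
  | cons q qs ih =>
    intro cnt
    by_cases h : q ≤ p
    · simp only [pyAdvance, if_pos h, List.takeWhile_cons, List.dropWhile_cons, decide_eq_true h,
        if_pos, ih, List.length_cons, Prod.mk.injEq]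
      refine ⟨by push_cast; ring, trivial⟩
    · simp [pyAdvance, h, List.takeWhile_cons, List.dropWhile_cons]

lemma takeWhile_length_eq_countP (p : Int) : ∀ (l : List Int), l.Pairwise (· ≤ ·) →
    (l.takeWhile (fun q => decide (q ≤ p))).length = l.countP (fun q => decide (q ≤ p)) := by
  intro l
  induction l with
  | nil => intro _; simp
  | cons q qs ih =>
    intro hp
    rcases List.pairwise_cons.mp hp with ⟨h1, h2⟩
    by_cases h : q ≤ p
    · simp [List.takeWhile_cons, List.countP_cons, h, ih h2]
    · have hz : qs.countP (fun q => decide (q ≤ p)) = 0 := by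
        rw [List.countP_eq_zero]
        intro x hx
        have := h1 x hx
        simp only [decide_eq_true_eq]
        omega
      simp [List.takeWhile_cons, List.countP_cons, h, hz]

lemma loopB2_eq (n : Int) (F : List Int) (hF : F.Pairwise (· ≤ ·)) :
    ∀ (qs pre rest xv sc : List Int),
    pre ++ rest = F →
    qs.Pairwise (· ≤ ·) →
    (∀ x ∈ pre, ∀ p ∈ qs, x ≤ p) →
    (qs.foldl (stepB2 n) (((pre.length : Nat) : Int), rest, xv, sc)).2.2 =
      (xv ++ qs.filter (fun p => decide (1 ≤ p ∧ p ≤ n)),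
       sc ++ (qs.filter (fun p => decide (1 ≤ p ∧ p ≤ n))).map
         (fun p => ((F.countP (fun q => decide (q ≤ p)) : Nat) : Int))) := by
  intro qs
  induction qs with
  | nil => intro pre rest xv sc _ _ _; simp
  | cons p qs ih =>
    intro pre rest xv sc hsplit hqs hpre
    rcases List.pairwise_cons.mp hqs with ⟨hpq, hqs'⟩
    have hrest : rest.Pairwise (· ≤ ·) := by
      rw [← hsplit] at hF
      exact (List.pairwise_append.mp hF).2.1
    by_cases hp : 1 ≤ p ∧ p ≤ n
    · have hpreP : pre.countP (fun q => decide (q ≤ p)) = pre.length := by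
        rw [List.countP_eq_length]
        intro x hx
        simp only [decide_eq_true_eq]
        exact hpre x hx p (by simp)
      have hcnt : ((pre.length : Nat) : Int) + ((rest.takeWhile (fun q => decide (q ≤ p))).length : Int)
          = ((F.countP (fun q => decide (q ≤ p)) : Nat) : Int) := by
        rw [← hsplit, List.countP_append, hpreP, takeWhile_length_eq_countP p rest hrest]
        push_cast; ring
      have hstep : stepB2 n (((pre.length : Nat) : Int), rest, xv, sc) p =
          (((F.countP (fun q => decide (q ≤ p)) : Nat) : Int),
           rest.dropWhile (fun q => decide (q ≤ p)), xv ++ [p],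
           sc ++ [((F.countP (fun q => decide (q ≤ p)) : Nat) : Int)]) := by
        simp only [stepB2, if_pos hp, pyAdvance_eq p rest, hcnt]
      have hlen' : ((pre ++ rest.takeWhile (fun q => decide (q ≤ p))).length : Int)
          = ((F.countP (fun q => decide (q ≤ p)) : Nat) : Int) := by
        rw [List.length_append]
        push_cast
        push_cast at hcnt
        omega
      have ihx := ih (pre ++ rest.takeWhile (fun q => decide (q ≤ p)))
        (rest.dropWhile (fun q => decide (q ≤ p))) (xv ++ [p])
        (sc ++ [((F.countP (fun q => decide (q ≤ p)) : Nat) : Int)])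
        (by rw [List.append_assoc, List.takeWhile_append_dropWhile, hsplit])
        hqs'
        (by
          intro x hx p' hp'
          rcases List.mem_append.mp hx with hx | hx
          · exact hpre x hx p' (List.mem_cons_of_mem _ hp')
          · have h1 : (fun q => decide (q ≤ p)) x = true :=
              List.mem_takeWhile_imp (p := fun q => decide (q ≤ p)) hx
            have h2 : x ≤ p := of_decide_eq_true h1
            exact le_trans h2 (hpq p' hp'))
      rw [List.foldl_cons, hstep]
      rw [hlen'] at ihx
      rw [ihx]
      have hfilter : (p :: qs).filter (fun p => decide (1 ≤ p ∧ p ≤ n))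
          = p :: qs.filter (fun p => decide (1 ≤ p ∧ p ≤ n)) := by
        simp [hp]
      rw [hfilter]
      simp
    · have hstep : stepB2 n (((pre.length : Nat) : Int), rest, xv, sc) p
          = (((pre.length : Nat) : Int), rest, xv, sc) := by
        simp only [stepB2, if_neg hp]
      have hfilter : (p :: qs).filter (fun p => decide (1 ≤ p ∧ p ≤ n))
          = qs.filter (fun p => decide (1 ≤ p ∧ p ≤ n)) := by
        simp [hp]
      rw [List.foldl_cons, hstep, hfilter]
      exact ih pre rest xv sc hsplit hqs'
        (fun x hx p' hp' => hpre x hx p' (List.mem_cons_of_mem _ hp'))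

-- two strictly increasing integer lists with the same members are equal
lemma eq_of_pairwise_lt : ∀ (l₁ l₂ : List Int), l₁.Pairwise (· < ·) → l₂.Pairwise (· < ·) →
    (∀ x, x ∈ l₁ ↔ x ∈ l₂) → l₁ = l₂ := by
  intro l₁
  induction l₁ with
  | nil =>
    intro l₂ _ _ hm
    cases l₂ with
    | nil => rfl
    | cons b l₂ =>
      have := (hm b).mpr (by simp)
      simp at this
  | cons a l₁ ih =>
    intro l₂ h₁ h₂ hm
    cases l₂ with
    | nil =>
      have := (hm a).mp (by simp)
      simp at this
    | cons b l₂ =>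
      rcases List.pairwise_cons.mp h₁ with ⟨ha, h₁'⟩
      rcases List.pairwise_cons.mp h₂ with ⟨hb, h₂'⟩
      have hab : a = b := by
        have hma : a ∈ b :: l₂ := (hm a).mp (by simp)
        have hmb : b ∈ a :: l₁ := (hm b).mpr (by simp)
        rcases List.mem_cons.mp hma with h | h
        · exact h
        · rcases List.mem_cons.mp hmb with h' | h'
          · exact h'.symm
          · have hba := hb a h
            have hab' := ha b h'
            omega
      subst hab
      congr 1
      refine ih l₂ h₁' h₂' ?_
      intro x
      constructor
      · intro hx
        have hax := ha x hx
        have hx2 := (hm x).mp (List.mem_cons_of_mem _ hx)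
        rcases List.mem_cons.mp hx2 with h | h
        · exfalso; omega
        · exact h
      · intro hx
        have hax := hb x hx
        have hx2 := (hm x).mpr (List.mem_cons_of_mem _ hx)
        rcases List.mem_cons.mp hx2 with h | h
        · exfalso; omega
        · exact h

-- the selected positions agree: sorted(set(x_values)) filtered to 1..n equals the in-order hits
lemma positions_eq (xs : List Int) (n : Nat) :
    (PySem.List.sorted (PySem.Set.ofList xs) (fun x => x) false).filter
        (fun p => decide (1 ≤ p ∧ p ≤ (n : Int)))
      = selPos xs n 0 := by
  have hA : ((PySem.List.sorted (PySem.Set.ofList xs) (fun x => x) false).filter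
      (fun p => decide (1 ≤ p ∧ p ≤ (n : Int)))).Pairwise (· < ·) :=
    (PySem.List.sorted_ofList_pairwise_lt xs).filter _
  refine eq_of_pairwise_lt _ _ hA (selPos_pairwise xs n 0) ?_
  intro x
  rw [selPos_mem xs n 0 x]
  simp only [List.mem_filter, PySem.List.mem_sorted, PySem.Set.mem_ofList, decide_eq_true_eq]
  constructor
  · rintro ⟨hx, h1, h2⟩
    exact ⟨hx, by omega, by omega⟩
  · rintro ⟨hx, h1, h2⟩
    exact ⟨hx, by omega, by omega⟩

-- ===== VERDICT (by name: the statement is the Claim_ definition above) =====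
theorem type_count_over_time_spec : Claim_equal_type_count_over_time := by
  intro ts xs _
  unfold Spec_type_count_over_time
  show type_count_over_time ts xs = type_count_over_time_alt ts xs
  have hB1 := loopB1_eq ts PySem.Set.empty [] 0
  simp only [List.nil_append, zero_add] at hB1
  have hqsPW : (PySem.List.sorted (PySem.Set.ofList xs) (fun x => x) false).Pairwise (· ≤ ·) := by
    have := PySem.List.sorted_pairwise (PySem.Set.ofList xs) (fun x => x)
    simpa using this
  have hFpw := firstsF_pairwise ts PySem.Set.empty 0
  have hB2 := loopB2_eq ((ts.length : Nat) : Int) (firstsF ts PySem.Set.empty 0) hFpw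
    (PySem.List.sorted (PySem.Set.ofList xs) (fun x => x) false)
    [] (firstsF ts PySem.Set.empty 0) [] []
    (by simp) hqsPW (by simp)
  simp only [List.length_nil, Nat.cast_zero, List.nil_append] at hB2
  unfold type_count_over_time type_count_over_time_alt
  rw [loopA_eq xs ts PySem.Set.empty 0 [] [], hB1, hB2]
  rw [mkPairs_eq xs ts PySem.Set.empty 0, positions_eq xs ts.length]
  have hlen0 : PySem.Set.len (PySem.Set.empty : PySem.Set String) = 0 := by
    simp [PySem.Set.len, PySem.Set.empty]
  simp only [List.nil_append, hlen0, add_zero, List.map_map, Prod.mk.injEq]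
  refine ⟨?_, ?_⟩
  · conv_rhs => rw [← List.map_id (selPos xs ts.length 0)]
    exact List.map_congr_left (fun p _ => rfl)
  · exact List.map_congr_left (fun p _ => rfl)
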